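-- pv_equiv track=rewrite | github.com/miguel-cruz18/Baseball_Game_Simulator | Baseball_Game_Simulation/Baseball.py | Runs_calc
-- ===== SOURCE A (Python) =====
-- def Runs_calc(list):
--     if sum(list) < 4:
--         return 0#No one reached home, no runs scored.
--     #The idea is to form a adding list but in descending form.
--     resta = 0
--     added_hits = []
--     for i in list:
--         added_hits.append(sum(list) - resta)
--         resta = resta + i
--     runs = 0
--     #For every number bigger or equal than form means
--     #someone reached home and scored a run.
--     for j in added_hits:
--         if j >= 4:
--             runs = runs + 1
--     return runs
-- ===== SOURCE B (Python) =====
-- def Runs_calc(list):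
--     runs = 0
--     s = 0
--     for x in reversed(list):
--         s += x
--         if s >= 4:
--             runs += 1
--     return runs if s >= 4 else 0
-- ===== Notes on version B (the rewrite author's own statement) =====
-- stated objective: alternative
-- what changed: Instead of A's forward pass that recomputes sum(list) per element to build a descending suffix-sum list and then counts it, B walks the list once right-to-left accumulating the suffix sum directly and counting, applying A's total<4 guard at the end from the same accumulator; intended as faster (O(n) vs O(n^2)) but a timing run could not confirm it on total<4 inputs where A exits early via C-level sum.
import Mathlib
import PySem

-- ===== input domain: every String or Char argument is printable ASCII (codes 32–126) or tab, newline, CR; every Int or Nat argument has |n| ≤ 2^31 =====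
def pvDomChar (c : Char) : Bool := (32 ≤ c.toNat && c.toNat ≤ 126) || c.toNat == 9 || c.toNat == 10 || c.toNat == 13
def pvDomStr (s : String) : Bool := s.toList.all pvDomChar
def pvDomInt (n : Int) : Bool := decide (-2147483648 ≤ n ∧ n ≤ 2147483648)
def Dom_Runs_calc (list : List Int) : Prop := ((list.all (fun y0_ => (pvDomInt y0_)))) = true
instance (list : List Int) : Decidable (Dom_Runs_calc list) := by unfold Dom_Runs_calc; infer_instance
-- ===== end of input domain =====

-- B replaces A's suffix-list build (sum(list) recomputed per element) + counting pass with a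
-- single right-to-left pass accumulating the suffix sum and the count in one accumulator pair.

-- ===== PORT A =====
def Runs_calc (list : List Int) : Int :=
  if list.sum < 4 then 0
  else
    let p := list.foldl
      (fun (st : Int × List Int) i => (st.1 + i, st.2 ++ [list.sum - st.1])) (0, [])
    p.2.foldl (fun runs j => if j ≥ 4 then runs + 1 else runs) 0

-- ===== PORT B =====
def Runs_calc_alt (list : List Int) : Int :=
  let p := list.reverse.foldl
    (fun (st : Int × Int) x =>
      let s := st.1 + x
      (s, if s ≥ 4 then st.2 + 1 else st.2)) (0, 0)
  if p.1 ≥ 4 then p.2 else 0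

-- ===== PRECONDITION & SPEC =====
def Spec_Runs_calc (list : List Int) (out : Int) : Prop := out = Runs_calc_alt list
instance (list : List Int) (out : Int) : Decidable (Spec_Runs_calc list out) := by unfold Spec_Runs_calc; infer_instance

-- ===== CLAIM (what is proved, stated in full; the proofs are below) =====
def Claim_equal_Runs_calc : Prop := ∀ (list : List Int), Dom_Runs_calc list → Spec_Runs_calc list (Runs_calc list)

-- ===== LEMMAS AND PROOFS =====

-- the list A builds: suffixList l v = [v, v - l0, v - l0 - l1, …] (one entry per element)
def suffixList : List Int → Int → List Int
  | [], _ => []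
  | a :: t, v => v :: suffixList t (v - a)

theorem buildA_eq (l : List Int) (T : Int) :
    ∀ (resta : Int) (acc : List Int),
    (l.foldl (fun (st : Int × List Int) i => (st.1 + i, st.2 ++ [T - st.1])) (resta, acc)).2
      = acc ++ suffixList l (T - resta) := by
  induction l with
  | nil => intro resta acc; simp [suffixList]
  | cons a t ih =>
    intro resta acc
    simp only [List.foldl_cons, suffixList]
    rw [ih (resta + a) (acc ++ [T - resta])]
    have : T - resta - a = T - (resta + a) := by ring
    simp [this]

-- counting pass of A, as countP, from any start
theorem countA_eq (L : List Int) : ∀ (k : Int),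
    L.foldl (fun runs j => if j ≥ 4 then runs + 1 else runs) k
      = k + (L.countP (fun j => decide (j ≥ 4)) : Int) := by
  induction L with
  | nil => intro k; simp
  | cons a t ih =>
    intro k
    simp only [List.foldl_cons, List.countP_cons]
    rw [ih]
    by_cases h : a ≥ 4
    · simp [h]; ring
    · simp [h]

-- B's backward loop computes (sum, count of suffix sums ≥ 4)
theorem loopB_eq (l : List Int) :
    l.reverse.foldl
      (fun (st : Int × Int) x =>
        let s := st.1 + x
        (s, if s ≥ 4 then st.2 + 1 else st.2)) (0, 0)
      = (l.sum, ((suffixList l l.sum).countP (fun j => decide (j ≥ 4)) : Int)) := by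
  induction l with
  | nil => simp [suffixList]
  | cons a t ih =>
    have hsum : (a :: t).sum = t.sum + a := by simp [List.sum_cons]; ring
    simp only [List.reverse_cons, List.foldl_append, ih, List.foldl_cons, List.foldl_nil,
      suffixList, List.countP_cons, hsum, add_sub_cancel_right]
    by_cases h : t.sum + a ≥ 4 <;> simp [h]

-- ===== VERDICT (by name: the statement is the Claim_ definition above) =====
theorem Runs_calc_spec : Claim_equal_Runs_calc := by
  intro list _
  unfold Spec_Runs_calc Runs_calc Runs_calc_alt
  rw [loopB_eq]
  simp only []
  by_cases h : list.sum < 4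
  · have h4 : ¬ (list.sum ≥ 4) := by omega
    simp [h, h4]
  · have h4 : list.sum ≥ 4 := by omega
    simp only [h, h4, if_pos]
    rw [buildA_eq list list.sum 0 []]
    simp only [List.nil_append, Int.sub_zero]
    rw [countA_eq]
    simp
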